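-- pv_equiv track=rewrite | github.com/aulee888/AdventOfCode2020 | day6/solution.py | part1
-- ===== SOURCE A (Python) =====
-- def part1(passengerGroups):
--     questionsString = 'abcdefghijklmnopqrstuvwxyz'
--     totalQuestions = 0
--
--     for group in passengerGroups:
--         groupAnswerSheet = {letter: '.' for letter in questionsString}
--
--         for person in group:
--
--             for answeredQ in person:
--                 if groupAnswerSheet[answeredQ] == '.':
--                     groupAnswerSheet[answeredQ] = '#'
--
--         for markedQ in groupAnswerSheet:
--             if groupAnswerSheet[markedQ] == '#':
--                 totalQuestions += 1
--
--     return totalQuestions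
-- ===== SOURCE B (Python) =====
-- def part1(passengerGroups):
--     questions = 'abcdefghijklmnopqrstuvwxyz'
--     total = 0
--     for group in passengerGroups:
--         nums = sorted(questions.index(c) for person in group for c in person)
--         distinct = 0
--         prev = None
--         for n in nums:
--             if n != prev:
--                 distinct += 1
--                 prev = n
--         total += distinct
--     return total
-- ===== Notes on version B (the rewrite author's own statement) =====
-- stated objective: alternative
-- what changed: Replaces A's 26-letter mark dict and final sweep with sort-then-scan: each answered question is translated to its question number with questions.index (which, like A's dict lookup, raises on a character that is not a question), the numbers of a group are sorted, and run boundaries are counted.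
import Mathlib
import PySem

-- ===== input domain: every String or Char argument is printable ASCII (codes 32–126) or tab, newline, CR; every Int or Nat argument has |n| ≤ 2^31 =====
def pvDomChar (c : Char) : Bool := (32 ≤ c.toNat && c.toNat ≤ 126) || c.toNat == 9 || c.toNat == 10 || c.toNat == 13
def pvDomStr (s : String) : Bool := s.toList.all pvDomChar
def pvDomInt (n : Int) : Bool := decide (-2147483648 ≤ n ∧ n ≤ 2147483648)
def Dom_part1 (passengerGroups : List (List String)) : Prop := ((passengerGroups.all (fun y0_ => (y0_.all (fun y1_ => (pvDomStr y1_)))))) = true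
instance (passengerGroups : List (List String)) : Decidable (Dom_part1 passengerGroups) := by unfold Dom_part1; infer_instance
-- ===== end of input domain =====

-- B replaces A's 26-letter mark dict and its final sweep with sort-then-scan: it translates each
-- answered question to its question number with questions.index (raising on a non-question, as A's
-- dict lookup does), sorts the numbers and counts run boundaries (return value only; no mutation).

-- ===== PORT A =====
-- questionsString = 'abcdefghijklmnopqrstuvwxyz'
def pvQuestions : List Char := "abcdefghijklmnopqrstuvwxyz".toList

-- groupAnswerSheet = {letter: '.' for letter in questionsString}
def pvSheet0 : PySem.Dict Char Char :=
  pvQuestions.foldl (fun d letter => d.insert letter '.') PySem.Dict.empty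

-- the two inner 'for person'/'for answeredQ' loops marking the sheet.
-- 'groupAnswerSheet[answeredQ]' raises KeyError for a key not in the sheet; Pre_part1
-- excludes those inputs, so the total 'getD … "?"' read is exact inside Pre_.
def pvMarkGroup (group : List String) : PySem.Dict Char Char :=
  group.foldl (fun d person =>
    person.toList.foldl (fun d answeredQ =>
      if d.getD answeredQ '?' == '.' then d.insert answeredQ '#' else d) d) pvSheet0

-- one iteration of the outer loop: mark the sheet, then sweep it ('for markedQ in groupAnswerSheet')
def pvGroupStepA (total : Int) (group : List String) : Int :=
  (pvMarkGroup group).keys.foldl (fun t markedQ =>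
    if (pvMarkGroup group).getD markedQ '?' == '#' then t + 1 else t) total

def part1 (passengerGroups : List (List String)) : Int :=
  passengerGroups.foldl pvGroupStepA 0

-- ===== PORT B =====
-- questions = 'abcdefghijklmnopqrstuvwxyz'
def pvQs : List Char := "abcdefghijklmnopqrstuvwxyz".toList

-- questions.index(c): exact for a one-character needle in this ASCII constant, where str.index
-- is the first position of the character; it raises ValueError for a character not among the
-- questions — Pre_part1 excludes those inputs, so the total '.getD 0' read is exact inside Pre_.
def pvIdx (c : Char) : Int := (((PySem.List.index? pvQs c).getD 0 : Nat) : Int)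

-- the scan 'if n != prev: distinct += 1; prev = n'
def pvF (st : Option Int × Int) (n : Int) : Option Int × Int :=
  if some n ≠ st.1 then (some n, st.2 + 1) else st

def pvScan (nums : List Int) : Option Int × Int :=
  nums.foldl pvF ((none : Option Int), (0 : Int))

-- nums = sorted(questions.index(c) for person in group for c in person)
def part1_alt (passengerGroups : List (List String)) : Int :=
  passengerGroups.foldl (fun total group =>
    total + (pvScan (PySem.List.sorted
      (group.flatMap (fun person => person.toList.map pvIdx)) (fun n => n) false)).2) 0

-- ===== PRECONDITION & SPEC =====
-- Pre_ excludes inputs containing any character outside 'a'-'z' (codes 97-122): there A raises KeyError.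
def Pre_part1 (passengerGroups : List (List String)) : Prop :=
  (passengerGroups.all (fun g => g.all (fun p =>
    p.toList.all (fun c => decide (97 ≤ c.toNat ∧ c.toNat ≤ 122))))) = true
instance (passengerGroups : List (List String)) : Decidable (Pre_part1 passengerGroups) := by
  unfold Pre_part1; infer_instance

def pvWitness_part1 : List (List String) := [["ab", "bc"], ["xyz"], ["q"]]

def Spec_part1 (passengerGroups : List (List String)) (out : Int) : Prop := out = part1_alt passengerGroups
instance (passengerGroups : List (List String)) (out : Int) : Decidable (Spec_part1 passengerGroups out) := by unfold Spec_part1; infer_instance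

-- ===== CLAIM (what is proved, stated in full; the proofs are below) =====
def Claim_equal_part1 : Prop := ∀ (passengerGroups : List (List String)), Dom_part1 passengerGroups → Pre_part1 passengerGroups → Spec_part1 passengerGroups (part1 passengerGroups)

-- ===== LEMMAS AND PROOFS =====

-- invariant of A's marking loops: keys stay pvQuestions, and a letter reads '#'
-- exactly when it is in the set s of characters seen so far
def pvInv (d : PySem.Dict Char Char) (s : PySem.Set Char) : Prop :=
  d.keys = pvQuestions ∧ ∀ ℓ ∈ pvQuestions, d.getD ℓ '?' = (if ℓ ∈ s then '#' else '.')

lemma pvItems0 : pvSheet0.items = pvQuestions.map (fun c => (c, '.')) := by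
  unfold pvSheet0
  have h := PySem.Dict.items_foldl_insert_fresh (l := pvQuestions) (d := PySem.Dict.empty)
    (k := fun a => a) (v := fun _ => '.') (fun a _ => rfl) (by decide)
  simpa using h

lemma pvKeys0 : pvSheet0.keys = pvQuestions := by
  show pvSheet0.items.map (·.1) = _
  rw [pvItems0, List.map_map]; simp [Function.comp_def]

lemma pvGetD0 (ℓ : Char) (h : ℓ ∈ pvQuestions) : pvSheet0.getD ℓ '?' = '.' := by
  apply PySem.Dict.getD_of_mem_items
  · rw [pvItems0]; exact List.mem_map.2 ⟨ℓ, h, rfl⟩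
  · rw [pvKeys0]; decide

lemma pvInv_init : pvInv pvSheet0 PySem.Set.empty :=
  ⟨pvKeys0, fun ℓ hℓ => by rw [pvGetD0 ℓ hℓ]; rfl⟩

lemma pvInv_mark (d : PySem.Dict Char Char) (s : PySem.Set Char) (cs : List Char)
    (hcs : ∀ c ∈ cs, c ∈ pvQuestions) (h : pvInv d s) :
    pvInv (cs.foldl (fun d c => if d.getD c '?' == '.' then d.insert c '#' else d) d)
          (PySem.Set.update s cs) := by
  induction cs generalizing d s with
  | nil => simpa [PySem.Set.update] using h
  | cons c cs ih =>
    simp only [List.foldl_cons, PySem.Set.update_cons]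
    apply ih
    · intro x hx; exact hcs x (List.mem_cons_of_mem _ hx)
    · have hc : c ∈ pvQuestions := hcs c (List.mem_cons_self ..)
      obtain ⟨hk, hv⟩ := h
      by_cases hmem : c ∈ s
      · rw [hv c hc, if_pos hmem]
        have h1 : ('#' == '.') = false := by decide
        rw [h1]
        simp only [Bool.false_eq_true, if_false]
        refine ⟨hk, fun ℓ hℓ => ?_⟩
        rw [hv ℓ hℓ, PySem.Set.add_of_mem hmem]
      · rw [hv c hc, if_neg hmem]
        have h1 : ('.' == '.') = true := by decide
        rw [h1, if_pos rfl]
        constructor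
        · rw [PySem.Dict.keys_insert_of_contains, hk]
          rw [PySem.Dict.contains_iff_mem_keys, hk]; exact hc
        · intro ℓ hℓ
          rw [PySem.Dict.getD_insert, PySem.Set.add_of_not_mem hmem]
          rcases eq_or_ne ℓ c with rfl | hne
          · simp
          · rw [if_neg hne, hv ℓ hℓ]
            by_cases hℓs : ℓ ∈ s <;> simp [hℓs, hne]

-- A's final sheet satisfies the invariant at the set of all of the group's characters
lemma pvMark_inv (group : List String)
    (hg : ∀ p ∈ group, ∀ c ∈ p.toList, c ∈ pvQuestions) :
    pvInv (pvMarkGroup group) (PySem.Set.ofList (group.flatMap String.toList)) := by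
  unfold pvMarkGroup
  have hfold : ∀ (gs : List String) (d : PySem.Dict Char Char) (s : PySem.Set Char),
      (∀ p ∈ gs, ∀ c ∈ p.toList, c ∈ pvQuestions) → pvInv d s →
      pvInv (gs.foldl (fun d person =>
          person.toList.foldl (fun d answeredQ =>
            if d.getD answeredQ '?' == '.' then d.insert answeredQ '#' else d) d) d)
        (PySem.Set.update s (gs.flatMap String.toList)) := by
    intro gs
    induction gs with
    | nil => intro d s _ h; simpa [PySem.Set.update] using h
    | cons p g ih =>
      intro d s hgs h
      simp only [List.foldl_cons, List.flatMap_cons, PySem.Set.update_append]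
      exact ih _ _ (fun q hq => hgs q (List.mem_cons_of_mem _ hq))
        (pvInv_mark d s p.toList (hgs p (List.mem_cons_self ..)) h)
  exact hfold group pvSheet0 PySem.Set.empty hg pvInv_init

-- a character with code in 97..122 is one of the 26 question letters
lemma pvMemOfCode (c : Char) (h1 : 97 ≤ c.toNat) (h2 : c.toNat ≤ 122) : c ∈ pvQuestions := by
  obtain ⟨n, hn⟩ : ∃ n, c.toNat = n := ⟨_, rfl⟩
  rw [hn] at h1 h2
  have hc := Char.ofNat_toNat c
  rw [hn] at hc
  interval_cases n <;> rw [← hc] <;> decide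

-- counting the members of a nodup sublist t of a nodup list u gives t.length
lemma pvCountP_mem {α : Type} [DecidableEq α] (u t : List α) (hu : u.Nodup) (ht : t.Nodup)
    (hsub : ∀ x ∈ t, x ∈ u) :
    (u.countP (fun x => decide (x ∈ t))) = t.length := by
  rw [List.countP_eq_length_filter]
  apply List.Perm.length_eq
  apply (List.perm_ext_iff_of_nodup (List.Nodup.filter _ hu) ht).2
  intro a
  simp only [List.mem_filter, decide_eq_true_eq]
  exact ⟨fun h => h.2, fun h => ⟨hsub a h, h⟩⟩

-- per-group value of A: the sweep adds the number of distinct characters of the group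
lemma pvGroup_eq (total : Int) (group : List String)
    (hg : ∀ p ∈ group, ∀ c ∈ p.toList, c ∈ pvQuestions) :
    pvGroupStepA total group
      = total + ((PySem.Set.ofList (group.flatMap String.toList)).length : Int) := by
  have hchars : ∀ c ∈ group.flatMap String.toList, c ∈ pvQuestions := by
    intro c hc
    obtain ⟨p, hp, hcp⟩ := List.mem_flatMap.1 hc
    exact hg p hp c hcp
  obtain ⟨hk, hv⟩ := pvMark_inv group hg
  set t := PySem.Set.ofList (group.flatMap String.toList) with ht
  have hsweep : ∀ ℓ ∈ pvQuestions,
      ((pvMarkGroup group).getD ℓ '?' == '#') = decide (ℓ ∈ t) := by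
    intro ℓ hℓ
    rw [hv ℓ hℓ]
    by_cases hm : ℓ ∈ t <;> simp [hm]
  unfold pvGroupStepA
  rw [hk]
  rw [PySem.List.foldl_if_add_one]
  congr 1
  rw [List.countP_congr (fun x hx => by rw [hsweep x hx])]
  rw [pvCountP_mem pvQuestions t (by decide) (PySem.Set.nodup_ofList _)
    (fun x hx => hchars x ((PySem.Set.mem_ofList _ _).1 hx))]

-- ----- B side: counting run boundaries of a sorted list counts the distinct elements -----

-- the distinct-count of a list is the card of its finset
lemma pvSetLen_eq_card {α : Type} [DecidableEq α] (l : List α) :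
    (PySem.Set.ofList l).length = l.toFinset.card := by
  rw [← List.toFinset_card_of_nodup (PySem.Set.nodup_ofList l)]
  congr 1
  apply Finset.ext
  intro a
  simp [List.mem_toFinset, PySem.Set.mem_ofList]

lemma pvCard_cons {α : Type} [DecidableEq α] (c : α) (t : List α) :
    (c :: t).toFinset.card = (t.filter (fun x => x ≠ c)).toFinset.card + 1 := by
  have h1 : (c :: t).toFinset = insert c (t.toFinset.erase c) := by
    apply Finset.ext; intro a; by_cases h : a = c <;> simp [h]
  rw [h1, Finset.card_insert_of_notMem (Finset.notMem_erase _ _)]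
  congr 1
  rw [List.toFinset_filter]
  congr 1
  apply Finset.ext
  intro a
  simp [Finset.mem_erase, Finset.mem_filter, and_comm]

lemma pvIdx_val (c : Char) (h1 : 97 ≤ c.toNat) (h2 : c.toNat ≤ 122) :
    pvIdx c = (c.toNat : Int) - 97 := by
  obtain ⟨n, hn⟩ : ∃ n, c.toNat = n := ⟨_, rfl⟩
  rw [hn] at h1 h2
  have hc := Char.ofNat_toNat c
  rw [hn] at hc
  unfold pvIdx
  rw [← hc]
  interval_cases n <;> decide

lemma pvF_some (p : Int) (d : Int) (n : Int) :
    pvF (some p, d) n = if n = p then (some p, d) else (some n, d + 1) := by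
  unfold pvF
  rcases eq_or_ne n p with rfl | h
  · simp
  · simp [h]

lemma pvF_none (d : Int) (n : Int) : pvF (none, d) n = (some n, d + 1) := by
  unfold pvF; simp

-- the scan over a sorted tail, with prev = some p and p ≤ every element
lemma pvScan_aux (l : List Int) (hl : l.Pairwise (· ≤ ·)) (p : Int)
    (hp : ∀ x ∈ l, p ≤ x) (d : Int) :
    (l.foldl pvF ((some p : Option Int), d)).2
      = d + ((l.filter (fun x => x ≠ p)).toFinset.card : Int) := by
  induction l generalizing p d with
  | nil => simp
  | cons c cs ih =>
    obtain ⟨hle, hcs⟩ := List.pairwise_cons.1 hl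
    rw [List.foldl_cons, pvF_some]
    rcases eq_or_ne c p with rfl | hne
    · rw [if_pos rfl, ih hcs c hle d]
      simp
    · rw [if_neg hne, ih hcs c hle (d + 1)]
      have hplt : ∀ x ∈ cs, p < x := fun x hx =>
        lt_of_lt_of_le (lt_of_le_of_ne (hp c (List.mem_cons_self ..)) (Ne.symm hne)) (hle x hx)
      have hfilter : cs.filter (fun x => x ≠ p) = cs :=
        List.filter_eq_self.2 (fun x hx => by simp [ne_of_gt (hplt x hx)])
      have hstep : ((c :: cs).filter (fun x => x ≠ p)) = c :: cs := by
        rw [List.filter_cons]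
        simp only [hne, ne_eq, not_false_eq_true, decide_true, if_true, hfilter]
      rw [hstep, pvCard_cons]
      push_cast
      ring

-- the whole scan of a sorted list returns its number of distinct elements
lemma pvScan_sorted (l : List Int) (hl : l.Pairwise (· ≤ ·)) :
    (pvScan l).2 = (l.toFinset.card : Int) := by
  unfold pvScan
  cases l with
  | nil => simp
  | cons c cs =>
    obtain ⟨hle, hcs⟩ := List.pairwise_cons.1 hl
    rw [List.foldl_cons, pvF_none, pvScan_aux cs hcs c hle (0 + 1), pvCard_cons]
    push_cast
    ring

-- per-group value of B equals the number of distinct characters of the group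
lemma pvGroupB (group : List String)
    (hg : ∀ p ∈ group, ∀ c ∈ p.toList, 97 ≤ c.toNat ∧ c.toNat ≤ 122) :
    (pvScan (PySem.List.sorted
        (group.flatMap (fun person => person.toList.map pvIdx)) (fun n => n) false)).2
      = ((PySem.Set.ofList (group.flatMap String.toList)).length : Int) := by
  set cs := group.flatMap String.toList with hcs
  have hchars : ∀ c ∈ cs, 97 ≤ c.toNat ∧ c.toNat ≤ 122 := by
    intro c hc
    obtain ⟨p, hp, hcp⟩ := List.mem_flatMap.1 hc
    exact hg p hp c hcp
  have hns : group.flatMap (fun person => person.toList.map pvIdx) = cs.map pvIdx := by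
    rw [hcs, List.map_flatMap]
  have hpair : (PySem.List.sorted (cs.map pvIdx) (fun n => n) false).Pairwise (· ≤ ·) :=
    PySem.List.sorted_pairwise (cs.map pvIdx) (fun n => n)
  rw [hns, pvScan_sorted _ hpair, pvSetLen_eq_card]
  have hperm : (PySem.List.sorted (cs.map pvIdx) (fun n => n) false).toFinset
      = (cs.map pvIdx).toFinset :=
    List.toFinset_eq_of_perm _ _ (PySem.List.sorted_perm (cs.map pvIdx) (fun n => n) false)
  have himg : (cs.map pvIdx).toFinset = cs.toFinset.image pvIdx := by
    apply Finset.ext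
    intro a
    simp [List.mem_toFinset, List.mem_map, Finset.mem_image]
  rw [hperm, himg, Finset.card_image_of_injOn]
  intro x hx y hy hxy
  rw [Finset.mem_coe, List.mem_toFinset] at hx hy
  obtain ⟨hx1, hx2⟩ := hchars x hx
  obtain ⟨hy1, hy2⟩ := hchars y hy
  rw [pvIdx_val x hx1 hx2, pvIdx_val y hy1 hy2] at hxy
  have : x.toNat = y.toNat := by omega
  rw [← Char.ofNat_toNat x, ← Char.ofNat_toNat y, this]

-- the outer folds agree group by group, with the accumulator generalized
lemma pvMain (gs : List (List String)) (t : Int)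
    (hpre : ∀ g ∈ gs, ∀ p ∈ g, ∀ c ∈ p.toList, 97 ≤ c.toNat ∧ c.toNat ≤ 122) :
    gs.foldl pvGroupStepA t
      = gs.foldl (fun total group =>
          total + (pvScan (PySem.List.sorted
            (group.flatMap (fun person => person.toList.map pvIdx)) (fun n => n) false)).2) t := by
  induction gs generalizing t with
  | nil => rfl
  | cons g gs ih =>
    simp only [List.foldl_cons]
    rw [pvGroup_eq t g (fun p hp c hc =>
        pvMemOfCode c (hpre g (List.mem_cons_self ..) p hp c hc).1
          (hpre g (List.mem_cons_self ..) p hp c hc).2),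
      pvGroupB g (hpre g (List.mem_cons_self ..))]
    exact ih _ (fun g' hg' => hpre g' (List.mem_cons_of_mem _ hg'))

-- ===== VERDICT (by name: the statement is the Claim_ definition above) =====
theorem part1_spec : Claim_equal_part1 := by
  intro passengerGroups _ hpre
  unfold Spec_part1 part1 part1_alt
  simp only [Pre_part1, List.all_eq_true, decide_eq_true_eq] at hpre
  exact pvMain passengerGroups 0 hpre
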